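-- pv_equiv track=rewrite | github.com/Yamir-Haidar/Seminario-py | logic/CaseRecord.py | __omicron_has_higher_frequency__
-- ===== SOURCE A (Python) =====
-- def __omicron_has_higher_frequency__(string: str) -> bool:
--     """
--     Devuelve True si el string "omicron" es el que sucede mas veces en
--     el string introducido por parametros(En caso de empate con otro
--     string en mayor numero de repeticiones, la funcion devolvera False).
--     :param string: str
--     :return: bool
--     """
--     switch_case = {}
--     for word in string.split(" - "):
--         if word in switch_case:
--             switch_case[word] += 1
--         else:
--             switch_case[word] = 1
--     return max(switch_case, key=switch_case.get) == "omicron" and \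
--         list(switch_case.values()).count(switch_case["omicron"]) == 1
-- ===== SOURCE B (Python) =====
-- def __omicron_has_higher_frequency__(string: str) -> bool:
--     words = string.split(" - ")
--     omi = words.count("omicron")
--     if omi == 0:
--         return False
--     return all(w == "omicron" or words.count(w) < omi for w in set(words))
-- ===== Notes on version B (the rewrite author's own statement) =====
-- stated objective: simpler
-- what changed: Replaces the dict-counting + global argmax + count-of-max-value test with a direct pass: count 'omicron' occurrences in the word list and check every other distinct word has a strictly smaller list.count, with no dict at all.
import Mathlib
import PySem

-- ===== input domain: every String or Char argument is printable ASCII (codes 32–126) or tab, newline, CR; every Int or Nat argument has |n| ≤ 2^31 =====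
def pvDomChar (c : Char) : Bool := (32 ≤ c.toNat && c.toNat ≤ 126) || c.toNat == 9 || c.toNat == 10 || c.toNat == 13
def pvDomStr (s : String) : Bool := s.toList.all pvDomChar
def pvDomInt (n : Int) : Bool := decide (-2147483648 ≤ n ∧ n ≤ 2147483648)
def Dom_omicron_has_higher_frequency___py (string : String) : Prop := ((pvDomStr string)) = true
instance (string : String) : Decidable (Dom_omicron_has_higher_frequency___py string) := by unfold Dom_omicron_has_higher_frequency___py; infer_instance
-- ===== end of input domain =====

-- B replaces A's dict counting + global argmax + count-of-max-value test with a direct pass over the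
-- word list: omicron's count must be nonzero and strictly beat every other distinct word's count
-- (objective: simpler — no dict, no argmax).

-- shared primitive: string.split(" - ")
def pvWords (s : String) : List String :=
  (PySem.Chars.splitOn s.toList " - ".toList).map String.ofList

-- ===== PORT A =====
def omicron_has_higher_frequency___py (string : String) : Bool :=
  let switch_case : PySem.Dict String Int :=
    (pvWords string).foldl
      (fun d word => if d.contains word then d.modify word 0 (· + 1) else d.insert word 1)
      PySem.Dict.empty
  -- max(switch_case, key=switch_case.get): first maximal key; `none` is unreachable (split(" - ")
  -- never yields an empty list, so the dict is nonempty).  The short-circuiting `and` is the match: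
  -- switch_case["omicron"] is only evaluated (as getD, the key being present) when m == "omicron".
  match PySem.List.max? switch_case.keys (fun k => switch_case.getD k 0) with
  | none => false
  | some m =>
      (m == "omicron") &&
        (PySem.List.count switch_case.values (switch_case.getD "omicron" 0) == 1)

-- ===== PORT B =====
def omicron_has_higher_frequency___py_alt (string : String) : Bool :=
  let words := pvWords string
  let omi := PySem.List.count words "omicron"
  if omi == 0 then false
  else (PySem.Set.ofList words).all
    (fun w => w == "omicron" || decide (PySem.List.count words w < omi))

-- ===== PRECONDITION & SPEC =====
def Spec_omicron_has_higher_frequency___py (string : String) (out : Bool) : Prop := out = omicron_has_higher_frequency___py_alt string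
instance (string : String) (out : Bool) : Decidable (Spec_omicron_has_higher_frequency___py string out) := by unfold Spec_omicron_has_higher_frequency___py; infer_instance

-- ===== CLAIM (what is proved, stated in full; the proofs are below) =====
def Claim_equal_omicron_has_higher_frequency___py : Prop := ∀ (string : String), Dom_omicron_has_higher_frequency___py string → Spec_omicron_has_higher_frequency___py string (omicron_has_higher_frequency___py string)

-- ===== LEMMAS AND PROOFS =====

-- A's body and B's body as functions of the word list
def aCore (ws : List String) : Bool :=
  let switch_case : PySem.Dict String Int :=
    ws.foldl (fun d word => if d.contains word then d.modify word 0 (· + 1) else d.insert word 1)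
      PySem.Dict.empty
  match PySem.List.max? switch_case.keys (fun k => switch_case.getD k 0) with
  | none => false
  | some m => (m == "omicron") && (PySem.List.count switch_case.values (switch_case.getD "omicron" 0) == 1)

def bCore (ws : List String) : Bool :=
  let omi := PySem.List.count ws "omicron"
  if omi == 0 then false
  else (PySem.Set.ofList ws).all (fun w => w == "omicron" || decide (PySem.List.count ws w < omi))

lemma portA_eq (s : String) : omicron_has_higher_frequency___py s = aCore (pvWords s) := rfl
lemma portB_eq (s : String) : omicron_has_higher_frequency___py_alt s = bCore (pvWords s) := rfl

-- A's counting loop (membership test + increment-or-insert) is Counter(ws)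
lemma fold_eq_counter (ws : List String) :
    ws.foldl (fun d word => if d.contains word then d.modify word 0 (· + 1) else d.insert word 1)
      PySem.Dict.empty = PySem.Dict.counter ws := by
  have hfun : (fun (d : PySem.Dict String Int) word =>
      if d.contains word then d.modify word 0 (· + 1) else d.insert word 1)
      = fun d word => d.modify word 0 (· + 1) := by
    funext d w
    by_cases h : d.contains w = true
    · simp [h]
    · have h0 : d.getD w 0 = 0 := PySem.Dict.getD_of_not_contains d 0 (by simpa using h)
      simp [h, PySem.Dict.modify, h0]
  rw [hfun, PySem.Dict.counter_eq_foldl]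

lemma two_le_countP {α : Type} [DecidableEq α] (l : List α) (p : α → Bool) (a b : α) (hn : l.Nodup)
    (ha : a ∈ l) (hb : b ∈ l) (hab : a ≠ b) (hpa : p a) (hpb : p b) :
    2 ≤ l.countP p := by
  rw [List.countP_eq_length_filter]
  have hnf : (l.filter p).Nodup := hn.filter p
  have haf : a ∈ l.filter p := List.mem_filter.mpr ⟨ha, hpa⟩
  have hbf : b ∈ l.filter p := List.mem_filter.mpr ⟨hb, hpb⟩
  have hsub : ({a, b} : Finset α) ⊆ (l.filter p).toFinset := by
    intro x hx
    simp only [Finset.mem_insert, Finset.mem_singleton] at hx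
    rcases hx with rfl | rfl <;> · rw [List.mem_toFinset]; exact List.mem_filter.mpr ⟨by assumption, by assumption⟩
  have hcard : ({a, b} : Finset α).card = 2 := Finset.card_pair hab
  calc 2 = ({a, b} : Finset α).card := hcard.symm
    _ ≤ (l.filter p).toFinset.card := Finset.card_le_card hsub
    _ = (l.filter p).length := List.toFinset_card_of_nodup hnf

lemma values_counter (ws : List String) :
    (PySem.Dict.counter ws).values
      = (PySem.Set.ofList ws).map (fun k => ((List.count k ws : Int))) := by
  show (PySem.Dict.counter ws).items.map Prod.snd = _
  rw [PySem.Dict.items_counter]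
  simp

lemma core_eq (ws : List String) : aCore ws = bCore ws := by
  unfold aCore bCore
  simp only [fold_eq_counter, PySem.Dict.keys_counter, PySem.Dict.getD_counter, values_counter,
    PySem.List.count_eq]
  have hKnodup : List.Nodup (PySem.Set.ofList ws) := PySem.Set.nodup_ofList ws
  cases hmax : PySem.List.max? (PySem.Set.ofList ws) (fun k => ((List.count k ws : Int))) with
  | none =>
    have hnil : ws = [] := by
      rcases ws with _ | ⟨w, t⟩
      · rfl
      · exfalso
        have hw : w ∈ PySem.Set.ofList (w :: t) := (PySem.Set.mem_ofList _ _).mpr (by simp)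
        rw [(PySem.List.max?_eq_none_iff _ _).mp hmax] at hw
        simp at hw
    subst hnil
    simp
  | some m =>
    have hmmem : m ∈ ws := (PySem.Set.mem_ofList _ _).mp (PySem.List.max?_mem hmax)
    have hmax' := PySem.List.max?_isMax hmax
    by_cases hc : List.count "omicron" ws = 0
    · have homem : "omicron" ∉ ws := List.count_eq_zero.mp hc
      have hmne : (m == "omicron") = false := by
        simp only [beq_eq_false_iff_ne, ne_eq]
        rintro rfl; exact homem hmmem
      simp [hc, hmne]
    · have homem : "omicron" ∈ ws := List.count_pos_iff.mp (Nat.pos_of_ne_zero hc)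
      have homemK : "omicron" ∈ PySem.Set.ofList ws := (PySem.Set.mem_ofList _ _).mpr homem
      have hcount_map : List.count ((List.count "omicron" ws : Int))
            ((PySem.Set.ofList ws).map (fun k => ((List.count k ws : Int))))
          = List.countP (fun k => ((List.count k ws : Int)) == ((List.count "omicron" ws : Int)))
              (PySem.Set.ofList ws) := by
        rw [List.count, List.countP_map]
        rfl
      rw [if_neg (by simpa using hc), Bool.eq_iff_iff]
      simp only [Bool.and_eq_true, beq_iff_eq, List.all_eq_true, Bool.or_eq_true,
        decide_eq_true_eq, hcount_map]
      constructor
      · rintro ⟨rfl, hone⟩ w hw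
        by_cases hwo : w = "omicron"
        · exact Or.inl hwo
        · refine Or.inr ?_
          have hle : (List.count w ws : Int) ≤ (List.count "omicron" ws : Int) := hmax' w hw
          rcases lt_or_eq_of_le hle with hlt | heq
          · exact_mod_cast hlt
          · exfalso
            have h2 : 2 ≤ List.countP
                (fun k => ((List.count k ws : Int)) == ((List.count "omicron" ws : Int)))
                (PySem.Set.ofList ws) :=
              two_le_countP _ _ w "omicron" hKnodup hw homemK hwo
                (by simpa using heq) (by simp)
            omega
      · intro hall
        have hm : m = "omicron" := by
          rcases hall m ((PySem.Set.mem_ofList _ _).mpr hmmem) with h | h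
          · exact h
          · exfalso
            have := hmax' "omicron" homemK
            have : (List.count "omicron" ws : Int) ≤ (List.count m ws : Int) := this
            exact absurd (by exact_mod_cast this) (Nat.not_le_of_lt h)
        subst hm
        refine ⟨rfl, ?_⟩
        have hcongr : List.countP
              (fun k => ((List.count k ws : Int)) == ((List.count "omicron" ws : Int)))
              (PySem.Set.ofList ws)
            = List.countP (· == "omicron") (PySem.Set.ofList ws) := by
          apply List.countP_congr
          intro k hk
          simp only [beq_iff_eq]
          constructor
          · intro hkc
            by_contra hkne
            rcases hall k hk with h | h
            · exact hkne h
            · have : List.count k ws = List.count "omicron" ws := by exact_mod_cast hkc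
              omega
          · rintro rfl; rfl
        rw [hcongr, ← List.count]
        exact List.count_eq_one_of_mem hKnodup homemK

-- ===== VERDICT (by name: the statement is the Claim_ definition above) =====
theorem omicron_has_higher_frequency___py_spec : Claim_equal_omicron_has_higher_frequency___py := by
  intro s _
  unfold Spec_omicron_has_higher_frequency___py
  rw [portA_eq, portB_eq, core_eq]
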